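-- pv_equiv track=rewrite | github.com/chapchapchup/Bakjoon_algorithm | boj_stage6/boj_1065.py | hansu_count
-- ===== SOURCE A (Python) =====
-- def is_hansu(n): #input : 수(100~999범위), return : 한수 여부
--     nlist = list(str(n))
--
--     a = int(nlist[0]) #백
--     b = int(nlist[1]) #십
--     c = int(nlist[2]) #일
--
--     if a-b==b-c:
--         return True
--     else:
--         return False
--
-- def hansu_count(n):#input : 범위, return : 범위 내 한수의 개수
--     counter=0
--
--     if 99<n<1000:
--         for i in range(100,n+1):
--             if is_hansu(i):
--                 counter+=1
--         counter += 99
--     elif n<100: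
--         counter = n
--     else:
--         counter = 144
--
--     return counter
-- ===== SOURCE B (Python) =====
-- def hansu_count(n):
--     # count hansu numbers up to n by enumerating 3-digit arithmetic sequences directly
--     if n < 100:
--         return n
--     if n >= 1000:
--         return 144
--     cnt = 99
--     for a in range(1, 10):
--         for d in range(-9, 10):
--             b = a + d
--             c = a + 2 * d
--             if 0 <= b <= 9 and 0 <= c <= 9:
--                 num = 100 * a + 10 * b + c
--                 if num <= n:
--                     cnt += 1
--     return cnt
-- ===== Notes on version B (the rewrite author's own statement) =====
-- stated objective: alternative
-- what changed: Instead of scanning every integer in [100,n] and digit-testing each via str(), B enumerates the three-digit arithmetic sequences directly (hundreds digit one..nine times common difference minus nine..nine), forms each candidate number and counts those at most n.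
import Mathlib
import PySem

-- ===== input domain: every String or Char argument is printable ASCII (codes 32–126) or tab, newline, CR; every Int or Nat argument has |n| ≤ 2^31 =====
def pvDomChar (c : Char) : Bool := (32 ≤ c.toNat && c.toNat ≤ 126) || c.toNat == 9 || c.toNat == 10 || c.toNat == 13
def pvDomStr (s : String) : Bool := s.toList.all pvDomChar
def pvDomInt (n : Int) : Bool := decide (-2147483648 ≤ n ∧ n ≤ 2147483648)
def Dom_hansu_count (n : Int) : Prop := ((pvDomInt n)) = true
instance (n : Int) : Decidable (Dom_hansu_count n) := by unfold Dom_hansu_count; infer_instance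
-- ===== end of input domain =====

-- B replaces A's scan of every integer in [100,n] with a direct enumeration of three-digit arithmetic sequences (alternative decomposition, same exact values).


-- ===== PORT A =====
def is_hansu (n : Int) : Bool :=
  let nlist := (PySem.Int.toStr n).toList
  match PySem.List.pyGet? nlist 0, PySem.List.pyGet? nlist 1, PySem.List.pyGet? nlist 2 with
  | some c0, some c1, some c2 =>
    match PySem.Int.ofChars? [c0], PySem.Int.ofChars? [c1], PySem.Int.ofChars? [c2] with
    | some a, some b, some c => a - b == b - c
    | _, _, _ => false
  | _, _, _ => false

def hansu_count (n : Int) : Int :=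
  if 99 < n ∧ n < 1000 then
    ((PySem.List.pyRange 100 (n + 1) 1).foldl
      (fun counter i => if is_hansu i then counter + 1 else counter) 0) + 99
  else if n < 100 then n
  else 144

-- ===== PORT B =====
def hansu_count_alt (n : Int) : Int :=
  if n < 100 then n
  else if n ≥ 1000 then 144
  else
    (PySem.List.pyRange 1 10 1).foldl (fun cnt a =>
      (PySem.List.pyRange (-9) 10 1).foldl (fun cnt d =>
        let b := a + d
        let c := a + 2 * d
        if 0 ≤ b ∧ b ≤ 9 ∧ 0 ≤ c ∧ c ≤ 9 then
          let num := 100 * a + 10 * b + c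
          if num ≤ n then cnt + 1 else cnt
        else cnt) cnt) 99

-- ===== PRECONDITION & SPEC =====
def Spec_hansu_count (n : Int) (out : Int) : Prop := out = hansu_count_alt n
instance (n : Int) (out : Int) : Decidable (Spec_hansu_count n out) := by unfold Spec_hansu_count; infer_instance

-- ===== CLAIM (what is proved, stated in full; the proofs are below) =====
def Claim_equal_hansu_count : Prop := ∀ (n : Int), Dom_hansu_count n → Spec_hansu_count n (hansu_count n)

-- ===== LEMMAS AND PROOFS =====

-- A's middle-case loop, as a function of the upper bound n.
def fA (n : Int) : Int :=
  (PySem.List.pyRange 100 (n + 1) 1).foldl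
    (fun counter i => if is_hansu i then counter + 1 else counter) 0

-- the validity test and the number built from (hundreds digit a, common difference d) in B
def pV (a d : Int) : Bool :=
  decide (0 ≤ a + d) && decide (a + d ≤ 9) && decide (0 ≤ a + 2 * d) && decide (a + 2 * d ≤ 9)
def numf (a d : Int) : Int := 100 * a + 10 * (a + d) + (a + 2 * d)

-- the list of numbers B's enumeration produces, in enumeration order
def hansuK : List Int :=
  (PySem.List.pyRange 1 10 1).flatMap (fun a =>
    ((PySem.List.pyRange (-9) 10 1).filter (pV a)).map (numf a))

lemma fA_step (n : Int) (h : (100:Int) ≤ n) :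
    fA n = fA (n - 1) + (if is_hansu n then 1 else 0) := by
  unfold fA
  have e1 : PySem.List.pyRange 100 (n + 1) 1 = PySem.List.pyRange 100 n 1 ++ [n] :=
    PySem.List.pyRange_one_succ_right h
  have e2 : n - 1 + 1 = n := by ring
  rw [e1, e2, List.foldl_append]
  simp only [List.foldl_cons, List.foldl_nil]
  by_cases hh : is_hansu n <;> simp [hh]

lemma sum_map_count (pv : Int → Int → Bool) (nf : Int → Int → Int) (ds : List Int) (n : Int) :
    ∀ as : List Int,
      ((as.map (fun a => ((List.countP (fun d => pv a d && decide (nf a d ≤ n)) ds : Nat) : Int))).sum)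
        = ((List.countP (fun x => decide (x ≤ n))
            (as.flatMap (fun a => (ds.filter (pv a)).map (nf a))) : Nat) : Int) := by
  intro as
  induction as with
  | nil => simp
  | cons a as ih =>
    simp only [List.map_cons, List.sum_cons, List.flatMap_cons, List.countP_append, ih]
    have : List.countP (fun x => decide (x ≤ n)) ((ds.filter (pv a)).map (nf a))
        = List.countP (fun d => pv a d && decide (nf a d ≤ n)) ds := by
      rw [List.countP_map, List.countP_filter]
      apply List.countP_congr
      intro d _
      simp [Bool.and_comm]
    rw [this]
    push_cast
    ring

lemma fB_closed (n : Int) (h1 : ¬ n < 100) (h2 : ¬ n ≥ 1000) :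
    hansu_count_alt n = 99 + ((List.countP (fun x => decide (x ≤ n)) hansuK : Nat) : Int) := by
  unfold hansu_count_alt
  rw [if_neg h1, if_neg h2]
  have hinner : ∀ a cnt : Int,
      (PySem.List.pyRange (-9) 10 1).foldl (fun cnt d =>
        let b := a + d
        let c := a + 2 * d
        if 0 ≤ b ∧ b ≤ 9 ∧ 0 ≤ c ∧ c ≤ 9 then
          let num := 100 * a + 10 * b + c
          if num ≤ n then cnt + 1 else cnt
        else cnt) cnt
      = cnt + ((List.countP (fun d => pV a d && decide (numf a d ≤ n)) (PySem.List.pyRange (-9) 10 1) : Nat) : Int) := by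
    intro a cnt
    have hb : (fun (cnt d : Int) =>
        let b := a + d
        let c := a + 2 * d
        if 0 ≤ b ∧ b ≤ 9 ∧ 0 ≤ c ∧ c ≤ 9 then
          let num := 100 * a + 10 * b + c
          if num ≤ n then cnt + 1 else cnt
        else cnt)
        = (fun (cnt d : Int) => if (pV a d && decide (numf a d ≤ n)) then cnt + 1 else cnt) := by
      funext cnt d
      simp only [pV, numf, Bool.and_eq_true, decide_eq_true_eq]
      split_ifs <;> tauto
    rw [hb, PySem.List.foldl_count_if]
  have houter :
      (PySem.List.pyRange 1 10 1).foldl (fun cnt a =>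
        (PySem.List.pyRange (-9) 10 1).foldl (fun cnt d =>
          let b := a + d
          let c := a + 2 * d
          if 0 ≤ b ∧ b ≤ 9 ∧ 0 ≤ c ∧ c ≤ 9 then
            let num := 100 * a + 10 * b + c
            if num ≤ n then cnt + 1 else cnt
          else cnt) cnt) 99
      = (PySem.List.pyRange 1 10 1).foldl (fun cnt a =>
          cnt + ((List.countP (fun d => pV a d && decide (numf a d ≤ n)) (PySem.List.pyRange (-9) 10 1) : Nat) : Int)) 99 := by
    have hfun : (fun (cnt a : Int) =>
        (PySem.List.pyRange (-9) 10 1).foldl (fun cnt d =>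
          let b := a + d
          let c := a + 2 * d
          if 0 ≤ b ∧ b ≤ 9 ∧ 0 ≤ c ∧ c ≤ 9 then
            let num := 100 * a + 10 * b + c
            if num ≤ n then cnt + 1 else cnt
          else cnt) cnt)
        = (fun (cnt a : Int) =>
            cnt + ((List.countP (fun d => pV a d && decide (numf a d ≤ n)) (PySem.List.pyRange (-9) 10 1) : Nat) : Int)) :=
      funext fun cnt => funext fun a => hinner a cnt
    rw [hfun]
  rw [houter, PySem.List.foldl_add, sum_map_count]
  rfl

lemma countP_le_split (n : Int) : ∀ K : List Int,
    List.countP (fun x => decide (x ≤ n)) K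
      = List.countP (fun x => decide (x ≤ n - 1)) K + List.count n K := by
  intro K
  induction K with
  | nil => simp
  | cons x K ih =>
    simp only [List.countP_cons, List.count_cons, ih]
    by_cases h3 : x = n
    · rw [if_pos (by simp only [decide_eq_true_eq]; omega),
        if_neg (by simp only [decide_eq_true_eq]; omega), if_pos (by simp [h3])]
      omega
    · by_cases h1 : x ≤ n
      · rw [if_pos (by simp only [decide_eq_true_eq]; omega),
          if_pos (by simp only [decide_eq_true_eq]; omega), if_neg (by simp [h3])]
        omega
      · rw [if_neg (by simp only [decide_eq_true_eq]; omega),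
          if_neg (by simp only [decide_eq_true_eq]; omega), if_neg (by simp [h3])]
        omega

set_option maxRecDepth 100000 in
set_option maxHeartbeats 4000000 in
lemma KH : hansuK = (PySem.List.pyRange 100 1000 1).filter is_hansu := by decide

lemma count_hansuK (n : Int) (h1 : (100:Int) ≤ n) (h2 : n ≤ 999) :
    (List.count n hansuK : Int) = (if is_hansu n then 1 else 0) := by
  rw [KH]
  by_cases hh : is_hansu n
  · rw [List.count_filter hh]
    rw [List.count_eq_one_of_mem (PySem.List.nodup_pyRange_one 100 1000)
      (PySem.List.mem_pyRange_one.mpr ⟨h1, by omega⟩)]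
    simp [hh]
  · rw [List.count_eq_zero.mpr, if_neg hh]
    · rfl
    · intro hmem
      rw [List.mem_filter] at hmem
      exact hh hmem.2

lemma main_ind : ∀ k : Nat, k ≤ 900 →
    fA (99 + (k : Int)) = ((List.countP (fun x => decide (x ≤ 99 + (k : Int))) hansuK : Nat) : Int) := by
  intro k
  induction k with
  | zero => intro _; decide
  | succ k ih =>
    intro hk
    have hk' : k ≤ 900 := by omega
    have hn1 : (100:Int) ≤ 99 + ((k + 1 : Nat) : Int) := by push_cast; omega
    have hstep := fA_step _ hn1
    have he : 99 + ((k + 1 : Nat) : Int) - 1 = 99 + (k : Int) := by push_cast; ring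
    rw [he] at hstep
    have hsplit := countP_le_split (99 + ((k + 1 : Nat) : Int)) hansuK
    rw [he] at hsplit
    have hcnt := count_hansuK (99 + ((k + 1 : Nat) : Int)) hn1 (by push_cast; omega)
    rw [hstep, ih hk', hsplit]
    by_cases hh : is_hansu (99 + ((k + 1 : Nat) : Int))
    · rw [if_pos hh] at hcnt ⊢; omega
    · rw [if_neg hh] at hcnt ⊢; omega

-- ===== VERDICT (by name: the statement is the Claim_ definition above) =====
theorem hansu_count_spec : Claim_equal_hansu_count := by
  intro n _
  unfold Spec_hansu_count
  by_cases h1 : n < 100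
  · unfold hansu_count hansu_count_alt
    rw [if_neg (by omega), if_pos h1, if_pos h1]
  · by_cases h2 : n ≥ 1000
    · unfold hansu_count hansu_count_alt
      rw [if_neg (by omega), if_neg (by omega), if_neg (by omega), if_pos h2]
    · have hA : hansu_count n = fA n + 99 := by
        unfold hansu_count fA
        rw [if_pos (by omega)]
      have hk : n = 99 + (((n - 99).toNat : Nat) : Int) := by omega
      have hle : (n - 99).toNat ≤ 900 := by omega
      rw [hA, fB_closed n h1 h2, hk, main_ind _ hle]
      ring
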